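-- pv_equiv track=rewrite | github.com/beam-tracing/Scotty | GUI/scottypygui.py | entrbatch
-- ===== SOURCE A (Python) =====
-- def entrbatch(x):
--     isv = True
--     if any(x.count(char) > 1 for char in "[]"): # If more than one of each square bracket exist, invalid
--         return False
--     for y in x:
--         try:
--             if y not in ['','.','-',',','[',']']: # Every character must be a number or valid symbol
--                 int(y)
--         except Exception:
--             isv = False
--             break
--     return isv
-- ===== SOURCE B (Python) =====
-- def entrbatch(x):
--     lb = rb = 0
--     for y in x:
--         if y == '[':
--             lb += 1
--         if y == ']':
--             rb += 1
--         if lb == 2 or rb == 2: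
--             return False
--         if y not in ('', '.', '-', ',', '[', ']'):
--             try:
--                 int(y)
--             except Exception:
--                 return False
--     return True
-- ===== Notes on version B (the rewrite author's own statement) =====
-- stated objective: alternative
-- what changed: B replaces A's two full x.count() passes plus a separate validation loop by a single pass that maintains both bracket counters inline and returns False at the first failure, keeping the literal int(y) probe.
import Mathlib
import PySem

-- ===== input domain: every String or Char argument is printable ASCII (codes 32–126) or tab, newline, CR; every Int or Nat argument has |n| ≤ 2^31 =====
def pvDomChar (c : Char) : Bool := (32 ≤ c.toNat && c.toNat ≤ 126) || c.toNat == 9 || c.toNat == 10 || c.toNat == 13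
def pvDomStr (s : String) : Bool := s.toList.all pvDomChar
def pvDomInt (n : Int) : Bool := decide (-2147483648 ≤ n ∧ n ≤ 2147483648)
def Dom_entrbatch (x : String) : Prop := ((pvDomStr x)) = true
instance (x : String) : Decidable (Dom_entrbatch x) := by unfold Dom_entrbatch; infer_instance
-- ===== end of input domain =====

-- B replaces A's two x.count() passes plus a separate validation loop by one pass with inline bracket counters and early exit (objective: alternative).

-- ===== PORT A =====
-- the for-loop with try/int(y) and break: returns false at the first character that is
-- neither a listed symbol nor accepted by int()
def entrA_loop : List Char → Bool
  | [] => true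
  | y :: rest =>
    if String.singleton y ∈ ["", ".", "-", ",", "[", "]"] then entrA_loop rest
    else
      match PySem.Int.ofStr? (String.singleton y) with
      | some _ => entrA_loop rest
      | none => false

def entrbatch (x : String) : Bool :=
  if ("[]".toList.any fun ch => decide (1 < PySem.Str.count x (String.singleton ch))) then false
  else entrA_loop x.toList

-- ===== PORT B =====
-- single pass: bracket counters lb/rb updated inline, early false on a second bracket
-- or on a character rejected by int()
def entrB_go : List Char → Nat → Nat → Bool
  | [], _, _ => true
  | y :: rest, lb, rb =>
    let lb' := if y = '[' then lb + 1 else lb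
    let rb' := if y = ']' then rb + 1 else rb
    if lb' = 2 ∨ rb' = 2 then false
    else if String.singleton y ∈ ["", ".", "-", ",", "[", "]"] then entrB_go rest lb' rb'
    else
      match PySem.Int.ofStr? (String.singleton y) with
      | some _ => entrB_go rest lb' rb'
      | none => false

def entrbatch_alt (x : String) : Bool := entrB_go x.toList 0 0

-- ===== PRECONDITION & SPEC =====
def Spec_entrbatch (x : String) (out : Bool) : Prop := out = entrbatch_alt x
instance (x : String) (out : Bool) : Decidable (Spec_entrbatch x out) := by unfold Spec_entrbatch; infer_instance

-- ===== CLAIM (what is proved, stated in full; the proofs are below) =====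
def Claim_equal_entrbatch : Prop := ∀ (x : String), Dom_entrbatch x → Spec_entrbatch x (entrbatch x)

-- ===== LEMMAS AND PROOFS =====

-- a character passes the per-character test
def okChar (y : Char) : Bool :=
  decide (String.singleton y ∈ ["", ".", "-", ",", "[", "]"]) ||
    (PySem.Int.ofStr? (String.singleton y)).isSome

theorem entrA_loop_eq_all (l : List Char) : entrA_loop l = l.all okChar := by
  induction l with
  | nil => rfl
  | cons y rest ih =>
    simp only [entrA_loop, List.all_cons, okChar]
    split
    · simp_all
    · cases h : PySem.Int.ofStr? (String.singleton y) <;> simp_all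

theorem count_go_singleton (c : Char) (l : List Char) (fuel acc : Nat)
    (h : l.length ≤ fuel) :
    PySem.Chars.count.go [c] fuel l acc = acc + l.count c := by
  induction l generalizing fuel acc with
  | nil => cases fuel <;> simp [PySem.Chars.count.go]
  | cons y rest ih =>
    cases fuel with
    | zero => simp at h
    | succ f =>
      simp only [List.length_cons, Nat.add_le_add_iff_right] at h
      by_cases hy : c = y
      · subst hy
        simp [PySem.Chars.count.go, List.isPrefixOf, ih _ _ h]
        omega
      · have hpf : [c].isPrefixOf (y :: rest) = false := by
          simp [List.isPrefixOf]
          exact fun hEq => hy hEq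
        simp [PySem.Chars.count.go, hpf, ih _ _ h, List.count_cons]
        exact fun hEq => hy hEq.symm

theorem chars_count_singleton (c : Char) (l : List Char) :
    PySem.Chars.count l [c] = l.count c := by
  simp [PySem.Chars.count, count_go_singleton c l l.length 0 le_rfl]

theorem entrB_go_eq (l : List Char) (lb rb : Nat) (hlb : lb ≤ 1) (hrb : rb ≤ 1) :
    entrB_go l lb rb =
      (decide (l.count '[' + lb ≤ 1) && decide (l.count ']' + rb ≤ 1) && l.all okChar) := by
  induction l generalizing lb rb with
  | nil => simp [entrB_go]; omega
  | cons y rest ih =>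
    simp only [entrB_go, List.all_cons, List.count_cons]
    by_cases h1 : y = '['
    · subst h1
      have hne : ('[' : Char) ≠ ']' := by decide
      by_cases h2 : lb = 1
      · subst h2
        simp [hne]
      · have hlb0 : lb = 0 := by omega
        subst hlb0
        have hok : okChar '[' = true := by decide
        have hmem : String.singleton '[' ∈ ["", ".", "-", ",", "[", "]"] := by decide
        simp [hne, hmem, ih 1 rb le_rfl hrb, hok]
        omega
    · by_cases h2 : y = ']'
      · subst h2
        by_cases h3 : rb = 1
        · subst h3
          simp [h1]
        · have hrb0 : rb = 0 := by omega
          subst hrb0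
          have hok : okChar ']' = true := by decide
          have hmem : String.singleton ']' ∈ ["", ".", "-", ",", "[", "]"] := by decide
          simp [h1, hmem, ih lb 1 hlb le_rfl, hok]
          omega
      · have hlb2 : ¬ (lb = 2 ∨ rb = 2) := by omega
        simp only [h1, h2, if_false]
        rw [if_neg hlb2]
        by_cases hmem : String.singleton y ∈ ["", ".", "-", ",", "[", "]"]
        · have hok : okChar y = true := by simp [okChar, hmem]
          simp [hmem, ih lb rb hlb hrb, hok, h1, h2]
        · simp only [if_neg hmem]
          cases hof : PySem.Int.ofStr? (String.singleton y) with
          | none =>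
            have hok : okChar y = false := by simp [okChar, hmem, hof]
            simp [hok]
          | some v =>
            have hok : okChar y = true := by simp [okChar, hof]
            simp [ih lb rb hlb hrb, hok, h1, h2]

theorem entrbatch_eq_alt (x : String) : entrbatch x = entrbatch_alt x := by
  unfold entrbatch entrbatch_alt
  rw [entrB_go_eq x.toList 0 0 (by omega) (by omega)]
  have h1 : PySem.Str.count x (String.singleton '[') = x.toList.count '[' := by
    rw [PySem.Str.count_eq]
    exact chars_count_singleton '[' x.toList
  have h2 : PySem.Str.count x (String.singleton ']') = x.toList.count ']' := by
    rw [PySem.Str.count_eq]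
    exact chars_count_singleton ']' x.toList
  simp only [show ("[]".toList) = ['[', ']'] from rfl, List.any_cons, List.any_nil,
    Bool.or_false, h1, h2]
  by_cases ha : 1 < x.toList.count '['
  · simp [ha]
  · by_cases hb : 1 < x.toList.count ']'
    · simp [ha, hb]
    · simp [ha, hb, entrA_loop_eq_all]
      omega

-- ===== VERDICT (by name: the statement is the Claim_ definition above) =====
theorem entrbatch_spec : Claim_equal_entrbatch := by
  intro x _
  unfold Spec_entrbatch
  exact entrbatch_eq_alt x
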